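-- pv_equiv track=rewrite | github.com/miliar/Code_Jam_Webscraper | solutions_python/Problem_155/2774.py | min_invites
-- ===== SOURCE A (Python) =====
-- def min_invites(spectators):
--     standed = 0
--     invites = 0
--     for shy, numshy in enumerate(list(spectators)):
--         if (standed < shy):
--             newpeople = shy-standed
--             invites += newpeople
--             standed += newpeople
--         standed += int(numshy)
--     return invites
-- ===== SOURCE B (Python) =====
-- def min_invites(spectators):
--     counts = [int(x) for x in spectators]
--
--     def enough(k):
--         standing = k
--         for need, count in enumerate(counts):
--             if standing < need:
--                 return False
--             standing += count
--         return True
--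
--     lo = 0
--     hi = len(counts) + sum(abs(c) for c in counts)
--     while lo < hi:
--         mid = (lo + hi) // 2
--         if enough(mid):
--             hi = mid
--         else:
--             lo = mid + 1
--     return lo
-- ===== Notes on version B (the rewrite author's own statement) =====
-- stated objective: alternative
-- what changed: Replaces A's single-pass simulation with two mutating accumulators by a binary search on the answer: a monotone feasibility check 'enough(k)' (can k pre-invited people satisfy every shyness level?) is bisected over [0, len + sum of |counts|].
import Mathlib
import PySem

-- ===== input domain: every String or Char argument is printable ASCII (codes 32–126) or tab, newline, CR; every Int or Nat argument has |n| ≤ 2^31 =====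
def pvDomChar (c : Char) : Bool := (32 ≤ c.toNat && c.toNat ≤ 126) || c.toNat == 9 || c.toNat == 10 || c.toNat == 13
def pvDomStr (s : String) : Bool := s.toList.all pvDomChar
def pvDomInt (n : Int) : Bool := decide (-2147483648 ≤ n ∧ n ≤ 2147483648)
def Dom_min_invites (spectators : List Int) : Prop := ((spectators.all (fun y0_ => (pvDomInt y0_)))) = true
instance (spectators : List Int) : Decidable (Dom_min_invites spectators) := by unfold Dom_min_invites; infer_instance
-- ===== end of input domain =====

-- B replaces A's one-pass simulation by a binary search on the answer over a monotone
-- feasibility predicate (objective: alternative decomposition, not faster).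

-- ===== PORT A =====
def min_invites (spectators : List Int) : Int :=
  (((PySem.List.enumerate spectators).foldl (fun (st : Int × Int) p =>
      let standed := st.1
      let invites := st.2
      let shy := p.1
      let numshy := p.2
      let st' :=
        if standed < shy then
          let newpeople := shy - standed
          (standed + newpeople, invites + newpeople)
        else (standed, invites)
      (st'.1 + numshy, st'.2)) (0, 0))).2

-- ===== PORT B =====
-- enough(k): walk the enumerated counts with `standing` people already up; early False on a deficit
def pvEnoughGo (standing : Int) : List (Int × Int) → Bool
  | [] => true
  | (need, count) :: t => if standing < need then false else pvEnoughGo (standing + count) t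

def pvEnough (counts : List Int) (k : Int) : Bool :=
  pvEnoughGo k (PySem.List.enumerate counts)

-- the while-loop of B's binary search (lo, hi as in Source B); fuel = hi - lo bounds the
-- iteration count (totality guard only: it is always sufficient, see pvBsearch_correct)
def pvBsearch (counts : List Int) : Nat → Int → Int → Int
  | 0, lo, _hi => lo
  | Nat.succ fuel, lo, hi =>
    if lo < hi then
      let mid := PySem.Int.floordiv (lo + hi) 2
      if pvEnough counts mid then pvBsearch counts fuel lo mid
      else pvBsearch counts fuel (mid + 1) hi
    else lo

def min_invites_alt (spectators : List Int) : Int :=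
  let counts := spectators.map (fun x => x)   -- int(x) is the identity on int
  let hi := (counts.length : Int) + (counts.map (fun c => |c|)).sum
  pvBsearch counts (hi - 0).toNat 0 hi

-- ===== PRECONDITION & SPEC =====
def Spec_min_invites (spectators : List Int) (out : Int) : Prop := out = min_invites_alt spectators
instance (spectators : List Int) (out : Int) : Decidable (Spec_min_invites spectators out) := by unfold Spec_min_invites; infer_instance

-- ===== CLAIM (what is proved, stated in full; the proofs are below) =====
def Claim_equal_min_invites : Prop := ∀ (spectators : List Int), Dom_min_invites spectators → Spec_min_invites spectators (min_invites spectators)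

-- ===== LEMMAS AND PROOFS =====

-- A's fold step, named for the lemmas
def pvAStep : Int × Int → Int × Int → Int × Int := fun st p =>
  let standed := st.1
  let invites := st.2
  let shy := p.1
  let numshy := p.2
  let st' :=
    if standed < shy then
      let newpeople := shy - standed
      (standed + newpeople, invites + newpeople)
    else (standed, invites)
  (st'.1 + numshy, st'.2)

theorem min_invites_eq (l : List Int) :
    min_invites l = ((PySem.List.enumerate l).foldl pvAStep (0, 0)).2 := rfl

-- invites only grow
theorem pvA_inv_le (l : List (Int × Int)) : ∀ s inv, inv ≤ (l.foldl pvAStep (s, inv)).2 := by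
  induction l with
  | nil => intro s inv; simp
  | cons p t ih =>
    intro s inv
    simp only [List.foldl, pvAStep]
    split_ifs with hc
    · exact le_trans (by omega) (ih _ _)
    · exact ih _ _

-- A's total invite count is feasible: standing s plus the invites A issues passes the walk
theorem pvA_feasible (l : List (Int × Int)) :
    ∀ s inv, pvEnoughGo (s + ((l.foldl pvAStep (s, inv)).2 - inv)) l = true := by
  induction l with
  | nil => intro s inv; simp [pvEnoughGo]
  | cons p t ih =>
    intro s inv
    obtain ⟨need, c⟩ := p
    simp only [List.foldl, pvAStep, pvEnoughGo]
    split_ifs with hc hlt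
    all_goals dsimp only at *
    all_goals try rw [show s + (need - s) + c = need + c from by omega] at *
    · -- A invited (s < need); standing ≥ need so the walk cannot fail here
      exfalso
      have h1 := pvA_inv_le t (need + c) (inv + (need - s))
      omega
    · have h := ih (need + c) (inv + (need - s))
      have he : s + (t.foldl pvAStep (need + c, inv + (need - s))).2 - inv + c
          = need + c + ((t.foldl pvAStep (need + c, inv + (need - s))).2 - (inv + (need - s))) := by
        omega
      rw [show s + ((t.foldl pvAStep (need + c, inv + (need - s))).2 - inv) + c
          = need + c + ((t.foldl pvAStep (need + c, inv + (need - s))).2 - (inv + (need - s))) from by omega]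
      exact h
    · -- no invite (¬ s < need); but the walk claims s + extra < need; extra ≥ 0
      exfalso
      have h1 := pvA_inv_le t (s + c) inv
      omega
    · rw [show s + ((t.foldl pvAStep (s + c, inv)).2 - inv) + c
          = (s + c) + ((t.foldl pvAStep (s + c, inv)).2 - inv) from by omega]
      exact ih (s + c) inv

-- any nonnegative k that passes the walk is at least A's invite count
theorem pvA_minimal (l : List (Int × Int)) :
    ∀ s inv k, 0 ≤ k → pvEnoughGo (s + k) l = true →
      (l.foldl pvAStep (s, inv)).2 - inv ≤ k := by
  induction l with
  | nil => intro s inv k hk _; simp; omega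
  | cons p t ih =>
    intro s inv k hk hE
    obtain ⟨need, c⟩ := p
    simp only [pvEnoughGo] at hE
    split_ifs at hE with hlt
    simp only [List.foldl, pvAStep]
    split_ifs with hc
    all_goals dsimp only at *
    all_goals try rw [show s + (need - s) + c = need + c from by omega] at *
    · -- A invites need - s; residual budget k' = s + k - need ≥ 0
      have h := ih (need + c) (inv + (need - s)) (s + k - need) (by omega)
        (by rw [show need + c + (s + k - need) = s + k + c from by omega]; exact hE)
      omega
    · have h := ih (s + c) inv k hk
        (by rw [show s + c + k = s + k + c from by omega]; exact hE)
      omega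

-- the walk is monotone in the standing count
theorem pvEnoughGo_mono (l : List (Int × Int)) :
    ∀ s s', s ≤ s' → pvEnoughGo s l = true → pvEnoughGo s' l = true := by
  induction l with
  | nil => intro s s' _ _; simp [pvEnoughGo]
  | cons p t ih =>
    intro s s' hle h
    obtain ⟨need, c⟩ := p
    simp only [pvEnoughGo] at h ⊢
    split_ifs at h ⊢ with h1 h2
    · omega
    · exact ih _ _ (by omega) h

-- characterization: for 0 ≤ k, enough(k) ⟺ min_invites ≤ k
theorem pvEnough_char (l : List Int) (k : Int) (hk : 0 ≤ k) :
    pvEnough l k = true ↔ min_invites l ≤ k := by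
  rw [min_invites_eq]
  constructor
  · intro h
    have := pvA_minimal (PySem.List.enumerate l) 0 0 k hk
      (by rw [show (0:Int) + k = k from by omega]; exact h)
    omega
  · intro h
    have h1 := pvA_feasible (PySem.List.enumerate l) 0 0
    rw [show (0:Int) + (((PySem.List.enumerate l).foldl pvAStep (0,0)).2 - 0)
        = ((PySem.List.enumerate l).foldl pvAStep (0,0)).2 from by omega] at h1
    exact pvEnoughGo_mono _ _ _ h h1

theorem pvA_nonneg (l : List Int) : 0 ≤ min_invites l := by
  rw [min_invites_eq]
  have := pvA_inv_le (PySem.List.enumerate l) 0 0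
  omega

-- the walk passes whenever the standing count dominates every need plus all possible losses
theorem pvEnoughGo_big (l : List (Int × Int)) :
    ∀ s, (∀ p ∈ l, p.1 + (l.map (fun q => |q.2|)).sum ≤ s) → pvEnoughGo s l = true := by
  induction l with
  | nil => intro s _; simp [pvEnoughGo]
  | cons p t ih =>
    intro s hs
    obtain ⟨need, c⟩ := p
    have hhead := hs (need, c) (by simp)
    have hsum0 : 0 ≤ (t.map (fun q => |q.2|)).sum := by
      apply List.sum_nonneg; intro x hx
      simp only [List.mem_map] at hx
      obtain ⟨q, _, rfl⟩ := hx
      exact abs_nonneg _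
    simp only [List.map_cons, List.sum_cons] at hhead
    have habs0 : (0:Int) ≤ |c| := abs_nonneg c
    simp only [pvEnoughGo]
    rw [if_neg (by omega)]
    apply ih
    intro q hq
    have := hs q (List.mem_cons_of_mem _ hq)
    simp only [List.map_cons, List.sum_cons] at this
    have habs : -|c| ≤ c := neg_abs_le c
    omega

theorem pvEnough_hi (l : List Int) :
    pvEnough l ((l.length : Int) + (l.map (fun c => |c|)).sum) = true := by
  apply pvEnoughGo_big
  intro p hp
  rw [PySem.List.mem_enumerate_iff] at hp
  obtain ⟨i, hi, rfl⟩ := hp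
  have hmap : (PySem.List.enumerate l).map (fun q => |q.2|) = l.map (fun c => |c|) := by
    have := PySem.List.map_snd_enumerate (xs := l) (s := 0)
    calc (PySem.List.enumerate l).map (fun q => |q.2|)
        = ((PySem.List.enumerate l).map (·.2)).map (fun c => |c|) := by
          rw [List.map_map]; rfl
      _ = l.map (fun c => |c|) := by rw [this]
  rw [hmap]
  simp only [Int.zero_add]
  have : (i : Int) < (l.length : Int) := by exact_mod_cast hi
  omega

-- binary search returns M given enough fuel and 0 ≤ lo ≤ M ≤ hi
theorem pvBsearch_correct (l : List Int) (fuel : Nat) :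
    ∀ (lo hi : Int), (hi - lo).toNat ≤ fuel → 0 ≤ lo → lo ≤ min_invites l → min_invites l ≤ hi →
    pvBsearch l fuel lo hi = min_invites l := by
  induction fuel with
  | zero =>
    intro lo hi hf h0 h1 h2
    simp only [pvBsearch]
    omega
  | succ fuel ih =>
    intro lo hi hf h0 h1 h2
    simp only [pvBsearch]
    by_cases hc : lo < hi
    · rw [if_pos hc]
      have hb : lo ≤ PySem.Int.floordiv (lo + hi) 2 ∧ PySem.Int.floordiv (lo + hi) 2 < hi := by
        rw [PySem.Int.floordiv_eq_ediv_of_pos (by omega : (0:Int) < 2)]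
        omega
      by_cases he : pvEnough l (PySem.Int.floordiv (lo + hi) 2) = true
      · rw [if_pos he]
        have := (pvEnough_char l _ (by omega)).1 he
        exact ih lo _ (by omega) h0 h1 this
      · rw [if_neg he]
        have hgt : ¬ min_invites l ≤ PySem.Int.floordiv (lo + hi) 2 := fun hle =>
          he ((pvEnough_char l _ (by omega)).2 hle)
        exact ih _ hi (by omega) (by omega) (by omega) h2
    · rw [if_neg hc]
      omega

-- ===== VERDICT (by name: the statement is the Claim_ definition above) =====
theorem min_invites_spec : Claim_equal_min_invites := by
  intro spectators _
  unfold Spec_min_invites min_invites_alt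
  simp only [List.map_id_fun', id]
  have hsum0 : 0 ≤ (spectators.map (fun c => |c|)).sum := by
    apply List.sum_nonneg; intro x hx
    simp only [List.mem_map] at hx
    obtain ⟨q, _, rfl⟩ := hx
    exact abs_nonneg _
  have hhi : min_invites spectators ≤ (spectators.length : Int) + (spectators.map (fun c => |c|)).sum := by
    have h := pvEnough_hi spectators
    exact (pvEnough_char spectators _ (by positivity)).1 h
  exact (pvBsearch_correct spectators _ 0 _ le_rfl le_rfl (pvA_nonneg spectators) hhi).symm
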